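-- pv_equiv track=rewrite | github.com/GuillaumeDomenge/7331 | AOC/day3/main.py | sep_enabled
-- ===== SOURCE A (Python) =====
-- def sep_enabled(text) -> str:
--     do = "do()"
--     dont = "don't()"
--     ans = ""
--     stat = 1
--     while len(text)>0:
--         if stat == 1:
--             try:
--                 tval, separator, text = text.partition(dont)
--                 stat = 0
--                 ans += tval
--             except:
--                 text = ""
--         else:
--             try:
--                 tval, separator, text = text.partition(do)
--                 stat = 1
--             except:
--                 text = ""
--     return ans
-- ===== SOURCE B (Python) =====
-- def sep_enabled(text) -> str:
--     pieces = []
--     pos = 0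
--     while True:
--         i = text.find("don't()", pos)
--         if i == -1:
--             pieces.append(text[pos:])
--             break
--         pieces.append(text[pos:i])
--         j = text.find("do()", i + 7)
--         if j == -1:
--             break
--         pos = j + 4
--     return "".join(pieces)
-- ===== Notes on version B (the rewrite author's own statement) =====
-- stated objective: faster
-- what changed: B replaces A's stateful alternating-partition loop (which rebuilds the remaining string on every marker) with a single cursor that find()s each don't()/do() pair in the original string and joins the kept slices once, so the text is never re-copied per marker.
import Mathlib
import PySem

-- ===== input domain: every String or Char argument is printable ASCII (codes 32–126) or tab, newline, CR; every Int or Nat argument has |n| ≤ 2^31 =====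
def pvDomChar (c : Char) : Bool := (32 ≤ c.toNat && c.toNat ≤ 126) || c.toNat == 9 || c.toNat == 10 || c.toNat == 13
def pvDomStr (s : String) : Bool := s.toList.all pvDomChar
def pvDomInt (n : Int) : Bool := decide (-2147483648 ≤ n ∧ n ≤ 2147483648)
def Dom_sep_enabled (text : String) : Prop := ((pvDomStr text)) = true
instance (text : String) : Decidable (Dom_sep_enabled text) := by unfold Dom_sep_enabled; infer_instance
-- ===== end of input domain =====

-- B replaces A's alternating-partition loop by a cursor that finds each don't()/do() pair in place
-- and joins the kept slices once, so A's per-marker re-copy of the remaining string is avoided.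

-- ===== PORT A =====
-- the two marker strings A binds at the top
def pvDo : List Char := "do()".toList
def pvDont : List Char := "don't()".toList

-- str.partition(sep): (before, sep, after) at the FIRST occurrence, (s, "", "") if absent — exact via Chars.find
def pvPartition (s sep : List Char) : List Char × List Char × List Char :=
  let i := PySem.Chars.find s sep
  if i = -1 then (s, [], [])
  else (s.take i.toNat, sep, s.drop (i.toNat + sep.length))

theorem pvPartition_rest_lt (s sep : List Char) (hs : s ≠ []) (hsep : sep ≠ []) :
    (pvPartition s sep).2.2.length < s.length := by
  unfold pvPartition
  have hlen : 0 < s.length := List.length_pos_iff.mpr hs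
  have hslen : 0 < sep.length := List.length_pos_iff.mpr hsep
  by_cases h : PySem.Chars.find s sep = -1
  · simp [h, hlen]
  · simp only [h, if_false]
    simp only [List.length_drop]
    omega

-- A's while loop: state (text, stat, ans); stat = 1 scans for don't() and keeps, stat = 0 scans for do()
def pvLoopA (text : List Char) (stat : Nat) (ans : List Char) : List Char :=
  if htext : text = [] then ans
  else if stat = 1 then
    let p := pvPartition text pvDont
    pvLoopA p.2.2 0 (ans ++ p.1)
  else
    let p := pvPartition text pvDo
    pvLoopA p.2.2 1 ans
termination_by text.length
decreasing_by
  · exact pvPartition_rest_lt text pvDont htext (by decide)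
  · exact pvPartition_rest_lt text pvDo htext (by decide)

def sep_enabled (text : String) : String :=
  String.ofList (pvLoopA text.toList 1 [])

-- ===== PORT B =====
-- termination facts for pvLoopB (cited in its decreasing_by)
theorem pvFindFrom_past (s sub : List Char) (st : Int) (hst : 0 ≤ st) (h : (s.length : Int) < st) :
    PySem.Chars.findFrom s sub st none = -1 := by
  simp only [PySem.Chars.findFrom]
  split_ifs <;> omega

theorem pvFindFrom_facts (s sub : List Char) (st : Int) (hsub : sub ≠ []) (hst : 0 ≤ st)
    (h : PySem.Chars.findFrom s sub st none ≠ -1) :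
    st ≤ PySem.Chars.findFrom s sub st none ∧
    (PySem.Chars.findFrom s sub st none).toNat + sub.length ≤ s.length := by
  by_cases hle : st ≤ (s.length : Int)
  · have hk : st = ((st.toNat : Nat) : Int) := (Int.toNat_of_nonneg hst).symm
    have hkle : st.toNat ≤ s.length := by omega
    rw [hk] at h ⊢
    obtain ⟨h1, h2, _⟩ := PySem.Chars.findFrom_natCast_spec s sub st.toNat hkle h
    refine ⟨h1, ?_⟩
    have hpl := List.IsPrefix.length_le h2
    have hs1 : 0 < sub.length := List.length_pos_iff.mpr hsub
    simp only [List.length_drop] at hpl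
    omega
  · exact absurd (pvFindFrom_past s sub st hst (by omega)) h

-- B's while loop: cursor pos into the ORIGINAL string, collected slices in pieces, joined at the end
def pvLoopB (s : List Char) (pos : Nat) (pieces : List (List Char)) : List (List Char) :=
  let i := PySem.Chars.findFrom s pvDont (pos : Int) none
  if hi : i = -1 then pieces ++ [PySem.Chars.slice s (some (pos : Int)) none]
  else
    let pieces' := pieces ++ [PySem.Chars.slice s (some (pos : Int)) (some i)]
    let j := PySem.Chars.findFrom s pvDo (i + 7) none
    if hj : j = -1 then pieces'
    else pvLoopB s (j + 4).toNat pieces'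
termination_by s.length - pos
decreasing_by
  have h1 := pvFindFrom_facts s pvDont ((pos : Nat) : Int) (by decide) (by positivity) hi
  have h2 := pvFindFrom_facts s pvDo (PySem.Chars.findFrom s pvDont ((pos : Nat) : Int) none + 7)
    (by decide) (by omega) hj
  omega

def sep_enabled_alt (text : String) : String :=
  String.ofList (PySem.Chars.join [] (pvLoopB text.toList 0 []))

-- ===== PRECONDITION & SPEC =====
def Spec_sep_enabled (text : String) (out : String) : Prop := out = sep_enabled_alt text
instance (text : String) (out : String) : Decidable (Spec_sep_enabled text out) := by unfold Spec_sep_enabled; infer_instance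

-- ===== CLAIM (what is proved, stated in full; the proofs are below) =====
def Claim_equal_sep_enabled : Prop := ∀ (text : String), Dom_sep_enabled text → Spec_sep_enabled text (sep_enabled text)

-- ===== LEMMAS AND PROOFS =====

theorem pvJoinNil (parts : List (List Char)) : PySem.Chars.join [] parts = parts.flatten := by
  simp only [PySem.Chars.join, List.intercalate]
  induction parts with
  | nil => rfl
  | cons p ps ih =>
    cases ps with
    | nil => rfl
    | cons q qs => simpa using ih

theorem pvLoopA_nil (stat : Nat) (ans : List Char) : pvLoopA [] stat ans = ans := by
  rw [pvLoopA.eq_def]; simp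

theorem pvLoopA_acc (n : Nat) : ∀ (text : List Char), text.length ≤ n → ∀ (stat : Nat) (ans : List Char),
    pvLoopA text stat ans = ans ++ pvLoopA text stat [] := by
  induction n with
  | zero =>
    intro text h stat ans
    have htext : text = [] := List.eq_nil_of_length_eq_zero (by omega)
    subst htext
    simp [pvLoopA_nil]
  | succ n ih =>
    intro text h stat ans
    by_cases htext : text = []
    · subst htext
      simp [pvLoopA_nil]
    · rw [pvLoopA.eq_def, pvLoopA.eq_def (ans := [])]
      simp only [dif_neg htext]
      by_cases hstat : stat = 1
      · simp only [if_pos hstat]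
        have hlt := pvPartition_rest_lt text pvDont htext (by decide)
        rw [ih _ (by omega) 0 (ans ++ (pvPartition text pvDont).1),
            ih _ (by omega) 0 ([] ++ (pvPartition text pvDont).1)]
        simp
      · simp only [if_neg hstat]
        have hlt := pvPartition_rest_lt text pvDo htext (by decide)
        exact ih _ (by omega) 1 ans

theorem pvNeNilOfFind (d sub : List Char) (hsub : sub ≠ []) (h : PySem.Chars.find d sub ≠ -1) :
    d ≠ [] := by
  have h0 : 0 ≤ PySem.Chars.find d sub := by
    have := PySem.Chars.neg_one_le_find d sub; omega
  have hinf : sub <:+: d := (PySem.Chars.find_nonneg_iff d sub).mp h0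
  intro hd; subst hd
  exact hsub (List.eq_nil_of_infix_nil hinf)

theorem pvLoopA_stat1_nofind (d : List Char) (hfd : PySem.Chars.find d pvDont = -1)
    (ans : List Char) : pvLoopA d 1 ans = ans ++ d := by
  by_cases hd : d = []
  · subst hd; simp [pvLoopA_nil]
  · rw [pvLoopA.eq_def]
    simp only [dif_neg hd, pvPartition, hfd, if_pos]
    simp [pvLoopA_nil]

theorem pvLoopA_stat0_nofind (r : List Char) (hg : PySem.Chars.find r pvDo = -1)
    (ans : List Char) : pvLoopA r 0 ans = ans := by
  by_cases hr : r = []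
  · subst hr; simp [pvLoopA_nil]
  · rw [pvLoopA.eq_def]
    simp only [dif_neg hr]
    norm_num
    simp only [pvPartition, hg, if_pos]
    simp [pvLoopA_nil]

theorem pvLoopA_stat1_find (d : List Char) (hfd : PySem.Chars.find d pvDont ≠ -1)
    (ans : List Char) :
    pvLoopA d 1 ans
      = pvLoopA (d.drop ((PySem.Chars.find d pvDont).toNat + 7)) 0
          (ans ++ d.take (PySem.Chars.find d pvDont).toNat) := by
  have hd : d ≠ [] := pvNeNilOfFind d pvDont (by decide) hfd
  rw [pvLoopA.eq_def]
  simp only [dif_neg hd, pvPartition, if_neg hfd]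
  rfl

theorem pvLoopA_stat0_find (r : List Char) (hg : PySem.Chars.find r pvDo ≠ -1)
    (ans : List Char) :
    pvLoopA r 0 ans = pvLoopA (r.drop ((PySem.Chars.find r pvDo).toNat + 4)) 1 ans := by
  have hr : r ≠ [] := pvNeNilOfFind r pvDo (by decide) hg
  rw [pvLoopA.eq_def]
  simp only [dif_neg hr]
  norm_num
  simp only [pvPartition, if_neg hg]
  rfl

theorem pvLoopB_eq_loopA (s : List Char) : ∀ (n pos : Nat), s.length - pos ≤ n → pos ≤ s.length →
    ∀ (pieces : List (List Char)),
    (pvLoopB s pos pieces).flatten = pieces.flatten ++ pvLoopA (s.drop pos) 1 [] := by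
  intro n
  induction n using Nat.strong_induction_on with
  | _ n ih =>
  intro pos hn hpos pieces
  rw [pvLoopB.eq_def]
  rw [PySem.Chars.findFrom_natCast s pvDont pos hpos]
  set d := s.drop pos with hd
  by_cases hfd : PySem.Chars.find d pvDont = -1
  · rw [if_pos hfd, dif_pos rfl]
    have hslice : PySem.Chars.slice s (some (pos : Int)) none = d := by
      show PySem.List.slice s (some (pos : Int)) none = d
      rw [PySem.List.slice_from s (a := (pos : Int)) (by positivity)]
      simp [hd]
    rw [hslice, pvLoopA_stat1_nofind d hfd []]
    simp
  · have h0 : 0 ≤ PySem.Chars.find d pvDont := by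
      have := PySem.Chars.neg_one_le_find d pvDont; omega
    set fd := (PySem.Chars.find d pvDont).toNat with hfdn
    rw [if_neg hfd, dif_neg (show ((pos : Int) + PySem.Chars.find d pvDont) ≠ -1 by omega)]
    have hslice : PySem.Chars.slice s (some (pos : Int)) (some ((pos : Int) + PySem.Chars.find d pvDont)) = d.take fd := by
      show PySem.List.slice s (some (pos : Int)) (some ((pos : Int) + PySem.Chars.find d pvDont)) = d.take fd
      rw [PySem.List.slice_toNat s (by positivity) (by omega)]
      simp only [Int.toNat_natCast, ← hd]
      congr 1
      omega
    have h7 : pvDont.length = 7 := by decide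
    have hspec := (PySem.Chars.find_spec (s := d) (sub := pvDont) h0).1
    have hlen7 : fd + 7 ≤ d.length := by
      have hle := List.IsPrefix.length_le hspec
      simp only [List.length_drop] at hle
      omega
    have hdlen : d.length = s.length - pos := by simp [hd]
    set k' := pos + fd + 7 with hk'
    have hk'le : k' ≤ s.length := by omega
    rw [show (pos : Int) + PySem.Chars.find d pvDont + 7 = ((k' : Nat) : Int) by omega]
    rw [PySem.Chars.findFrom_natCast s pvDo k' hk'le]
    have hdropk : s.drop k' = d.drop (fd + 7) := by
      rw [hd, List.drop_drop]; congr 1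
    rw [pvLoopA_stat1_find d hfd []]
    rw [show d.drop ((PySem.Chars.find d pvDont).toNat + 7) = s.drop k' from by rw [hdropk]]
    by_cases hg : PySem.Chars.find (s.drop k') pvDo = -1
    · rw [if_pos hg, dif_pos rfl]
      rw [pvLoopA_stat0_nofind _ hg]
      simp only [PySem.Chars.slice] at hslice
      simp [hslice]
      omega
    · have hg0 : 0 ≤ PySem.Chars.find (s.drop k') pvDo := by
        have := PySem.Chars.neg_one_le_find (s.drop k') pvDo; omega
      set g := (PySem.Chars.find (s.drop k') pvDo).toNat with hgn
      rw [if_neg hg, dif_neg (show ((k' : Int) + PySem.Chars.find (s.drop k') pvDo) ≠ -1 by omega)]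
      have h4 : pvDo.length = 4 := by decide
      have hspec2 := (PySem.Chars.find_spec (s := s.drop k') (sub := pvDo) hg0).1
      have hlen4 : g + 4 ≤ s.length - k' := by
        have hle := List.IsPrefix.length_le hspec2
        simp only [List.length_drop] at hle
        omega
      set np := k' + g + 4 with hnp
      rw [show ((k' : Int) + PySem.Chars.find (s.drop k') pvDo + 4).toNat = np by omega]
      rw [pvLoopA_stat0_find _ hg]
      rw [show (s.drop k').drop ((PySem.Chars.find (s.drop k') pvDo).toNat + 4) = s.drop np from by
        rw [List.drop_drop]; congr 1]
      rw [pvLoopA_acc (s.drop np).length _ (le_refl _) 1 ([] ++ d.take fd)]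
      rw [hslice]

      rw [ih (s.length - np) (by omega) np (le_refl _) (by omega) (pieces ++ [d.take fd])]
      simp

-- ===== VERDICT (by name: the statement is the Claim_ definition above) =====
theorem sep_enabled_spec : Claim_equal_sep_enabled := by
  intro text _
  unfold Spec_sep_enabled sep_enabled sep_enabled_alt
  rw [pvJoinNil]
  rw [pvLoopB_eq_loopA text.toList text.toList.length 0 (by omega) (by omega) []]
  simp
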